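-- pv_equiv track=rewrite | github.com/joakiti/Benchmark-SubsetSums | Implementations/FastIntegersFromGit.py | naive_subset_sums_up_to_u
-- ===== SOURCE A (Python) =====
-- def naive_subset_sums_up_to_u(xs, u):
--     sums = {0}
--     for x in xs:
--         sums2 = set(sums)
--         for y in sums:
--             if x + y < u:
--                 sums2.add(x + y)
--         sums = sums2
--     return sums
-- ===== SOURCE B (Python) =====
-- def naive_subset_sums_up_to_u(xs, u):
--     # Event-driven BFS with round buckets: each sum, when first discovered,
--     # schedules all its successor candidates into future rounds; no rescans
--     # of the whole sum set per element.
--     n = len(xs)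
--     buckets = [[] for _ in range(n + 1)]
--     buckets[0].append(0)
--     seen = set()
--     for k in range(n + 1):
--         for v in buckets[k]:
--             if v not in seen:
--                 seen.add(v)
--                 for j in range(k, n):
--                     w = v + xs[j]
--                     if w < u:
--                         buckets[j + 1].append(w)
--     return seen
-- ===== Notes on version B (the rewrite author's own statement) =====
-- stated objective: alternative
-- what changed: A repeatedly rescans the whole sum set once per element; B is an event-driven BFS over round buckets: each sum, the moment it is first discovered, schedules all its successor candidates (sum + xs[j]) into the buckets of future rounds, and each round only pops its own bucket of pending candidates against a visited set, so the per-element rescan of the full set disappears.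
import Mathlib
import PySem

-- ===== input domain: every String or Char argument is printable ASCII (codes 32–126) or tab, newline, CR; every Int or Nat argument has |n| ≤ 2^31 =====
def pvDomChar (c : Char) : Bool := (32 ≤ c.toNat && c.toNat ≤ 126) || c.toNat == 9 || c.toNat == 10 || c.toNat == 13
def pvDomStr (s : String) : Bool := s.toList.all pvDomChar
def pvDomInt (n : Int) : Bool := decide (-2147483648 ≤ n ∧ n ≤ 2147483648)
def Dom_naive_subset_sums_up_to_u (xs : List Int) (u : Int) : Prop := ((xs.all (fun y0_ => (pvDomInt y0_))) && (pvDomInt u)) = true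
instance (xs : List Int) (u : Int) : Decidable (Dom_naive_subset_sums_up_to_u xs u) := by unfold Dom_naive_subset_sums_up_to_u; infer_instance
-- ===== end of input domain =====

-- B replaces A's per-element rescans of the whole sum set by an event-driven BFS with round
-- buckets: each sum, when first discovered, schedules its successor candidates into the buckets
-- of future rounds, and each round only pops its own bucket (objective: alternative; same asymptotic cost).

-- ===== PORT A =====
def naive_subset_sums_up_to_u (xs : List Int) (u : Int) : List Int :=
  xs.foldl (fun sums x =>
    -- sums2 = set(sums); for y in sums: if x + y < u: sums2.add(x + y); sums = sums2
    sums.foldl (fun sums2 y => if x + y < u then PySem.Set.add sums2 (x + y) else sums2) sums) [0]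

-- ===== PORT B =====
-- helper for 'for j in range(k, n): w = v + xs[j]; if w < u: buckets[j+1].append(w)'
-- (xs[j] and buckets[j+1] are always in range here, so the total pyGetD/pySetD forms are exact)
def pvPush (xs : List Int) (u : Int) (k : Int) (v : Int) (bkts : List (List Int)) : List (List Int) :=
  (PySem.List.pyRange k (xs.length : Int) 1).foldl (fun bkts j =>
    let w := v + PySem.List.pyGetD xs j 0
    if w < u then PySem.List.pySetD bkts (j + 1) (PySem.List.pyGetD bkts (j + 1) [] ++ [w])
    else bkts) bkts

def naive_subset_sums_up_to_u_alt (xs : List Int) (u : Int) : List Int :=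
  let n : Int := (xs.length : Int)
  -- buckets = [[] for _ in range(n + 1)]; buckets[0].append(0)
  let buckets0 := (PySem.List.pyRange 0 (n + 1) 1).map (fun _ => ([] : List Int))
  let buckets1 := PySem.List.pySetD buckets0 0 (PySem.List.pyGetD buckets0 0 [] ++ [0])
  -- for k in range(n + 1): for v in buckets[k]: if v not in seen: seen.add(v); <push loop>
  let fin := (PySem.List.pyRange 0 (n + 1) 1).foldl (fun (st : List (List Int) × List Int) k =>
      (PySem.List.pyGetD st.1 k []).foldl (fun (st2 : List (List Int) × List Int) v =>
        if PySem.Set.contains st2.2 v then st2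
        else (pvPush xs u k v st2.1, PySem.Set.add st2.2 v)) st)
    (buckets1, PySem.Set.empty)
  fin.2

-- ===== PRECONDITION & SPEC =====
def Spec_naive_subset_sums_up_to_u (xs : List Int) (u : Int) (out : List Int) : Prop := out = naive_subset_sums_up_to_u_alt xs u
instance (xs : List Int) (u : Int) (out : List Int) : Decidable (Spec_naive_subset_sums_up_to_u xs u out) := by unfold Spec_naive_subset_sums_up_to_u; infer_instance

-- ===== CLAIM (what is proved, stated in full; the proofs are below) =====
def Claim_equal_naive_subset_sums_up_to_u : Prop := ∀ (xs : List Int) (u : Int), Dom_naive_subset_sums_up_to_u xs u → Spec_naive_subset_sums_up_to_u xs u (naive_subset_sums_up_to_u xs u)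

-- ===== LEMMAS AND PROOFS =====

-- candidates generated by element x from the sums L, in L's order
def pvCand (u x : Int) (L : List Int) : List Int :=
  (L.filter (fun v => decide (v + x < u))).map (fun v => v + x)

-- canonical round iteration both ports reduce to
def pvRounds (u : Int) (seen ys : List Int) : List Int :=
  ys.foldl (fun L x => PySem.Set.update L (pvCand u x L)) seen

-- the elements of c that are new w.r.t. seen, in order (what the inner loop pushes from)
def pvNew (seen : List Int) : List Int → List Int
  | [] => []
  | v :: c => if PySem.Set.contains seen v then pvNew seen c
              else v :: pvNew (seen ++ [v]) c

theorem pv_cand_append (u x : Int) (L1 L2 : List Int) :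
    pvCand u x (L1 ++ L2) = pvCand u x L1 ++ pvCand u x L2 := by
  simp [pvCand]

theorem pv_cand_cons (u x v : Int) (L : List Int) :
    pvCand u x (v :: L) = (if v + x < u then [v + x] else []) ++ pvCand u x L := by
  simp only [pvCand, List.filter_cons]
  split_ifs with h <;> simp_all

theorem pv_update_eq_append_new (c seen : List Int) :
    PySem.Set.update seen c = seen ++ pvNew seen c := by
  induction c generalizing seen with
  | nil => simp [PySem.Set.update, pvNew]
  | cons v c ih =>
    simp only [PySem.Set.update, List.foldl_cons, pvNew]
    by_cases h : PySem.Set.contains seen v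
    · have : PySem.Set.add seen v = seen := by simp [PySem.Set.add, PySem.Set.contains] at h ⊢; simp [h]
      rw [this, if_pos h, ← PySem.Set.update, ih]
    · have : PySem.Set.add seen v = seen ++ [v] := by
        simp [PySem.Set.add, PySem.Set.contains] at h ⊢; simp [h]
      rw [this, if_neg h, ← PySem.Set.update, ih, List.append_assoc]
      rfl

theorem pv_nodup_add (s : List Int) (x : Int) (h : s.Nodup) : (PySem.Set.add s x).Nodup := by
  by_cases hc : x ∈ s
  · simp [PySem.Set.add, hc, h]
  · simp only [PySem.Set.add]
    split_ifs with h2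
    · exact h
    · rw [List.nodup_append]
      refine ⟨h, by simp, ?_⟩
      intro a ha b hb
      simp only [List.mem_singleton] at hb
      subst hb; exact fun hax => hc (hax ▸ ha)

theorem pv_nodup_update (c seen : List Int) (h : seen.Nodup) :
    (PySem.Set.update seen c).Nodup := by
  induction c generalizing seen with
  | nil => simpa [PySem.Set.update]
  | cons v c ih =>
    simp only [PySem.Set.update, List.foldl_cons]
    exact ih _ (pv_nodup_add _ _ h)

-- A's port equals the canonical round iteration
theorem pv_A_eq (xs : List Int) (u : Int) :
    naive_subset_sums_up_to_u xs u = pvRounds u [0] xs := by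
  unfold naive_subset_sums_up_to_u pvRounds
  congr 1
  funext L x
  rw [PySem.List.foldl_ite_eq_foldl_filter, ← PySem.Set.update_map_eq_foldl_add]
  congr 1
  have hf : (L.filter fun y => decide (x + y < u)) = L.filter fun v => decide (v + x < u) :=
    List.filter_congr (fun a _ => by rw [Int.add_comm])
  rw [pvCand, ← hf]
  exact List.map_congr_left (fun a _ => Int.add_comm x a)

theorem pv_pySetD_natCast (l : List (List Int)) (n : Nat) (v : List Int) (h : n < l.length) :
    PySem.List.pySetD l (n : Int) v = l.set n v := by
  rw [PySem.List.pySetD, PySem.List.pySet?_natCast l n v h]; rfl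

-- the push loop appends v's candidate to every future bucket j+1, k ≤ j < n, that v reaches
theorem pv_pySetD_length {α : Type} (l : List α) (i : Int) (v : α) :
    (PySem.List.pySetD l i v).length = l.length := by
  unfold PySem.List.pySetD PySem.List.pySet?
  cases PySem.List.pyIdx? l.length i <;> simp

theorem pv_push_getD_fuel (xs : List Int) (u v : Int) : ∀ (fuel k j : Nat) (bkts : List (List Int)),
    xs.length - k ≤ fuel → bkts.length = xs.length + 1 →
    (pvPush xs u (k : Int) v bkts).getD j [] =
      if k + 1 ≤ j ∧ j ≤ xs.length ∧ v + xs.getD (j - 1) 0 < u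
      then bkts.getD j [] ++ [v + xs.getD (j - 1) 0] else bkts.getD j [] := by
  intro fuel
  induction fuel with
  | zero =>
    intro k j bkts hf hlen
    have hkn : xs.length ≤ k := by omega
    unfold pvPush
    rw [PySem.List.pyRange_one_eq_nil (by exact_mod_cast hkn)]
    rw [if_neg (by omega)]
    rfl
  | succ fuel ih =>
    intro k j bkts hf hlen
    by_cases hkn : xs.length ≤ k
    · unfold pvPush
      rw [PySem.List.pyRange_one_eq_nil (by exact_mod_cast hkn)]
      rw [if_neg (by omega)]
      rfl
    · have hk : k < xs.length := by omega
      -- peel round j = k off the push loop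
      have hcons : PySem.List.pyRange (k : Int) (xs.length : Int) 1
          = (k : Int) :: PySem.List.pyRange ((k : Int) + 1) (xs.length : Int) 1 :=
        PySem.List.pyRange_one_cons (by exact_mod_cast hk)
      set w := v + xs.getD k 0 with hw
      set bkts' := if w < u then bkts.set (k + 1) (bkts.getD (k + 1) [] ++ [w]) else bkts with hb'
      have hstep : pvPush xs u (k : Int) v bkts = pvPush xs u ((k + 1 : Nat) : Int) v bkts' := by
        unfold pvPush
        rw [hcons, List.foldl_cons]
        have h1 : PySem.List.pyGetD xs (k : Int) 0 = xs.getD k 0 := by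
          simp only [PySem.List.pyGetD_natCast]
        have h2 : ((k : Int) + 1) = (((k + 1 : Nat)) : Int) := by push_cast; ring
        have h3 : PySem.List.pyGetD bkts (((k + 1 : Nat)) : Int) [] = bkts.getD (k + 1) [] := by
          simp only [PySem.List.pyGetD_natCast]
        have h4 : k + 1 < bkts.length := by omega
        simp only [h1, h2, h3]
        congr 1
        split_ifs with hwu
        · rw [pv_pySetD_natCast bkts (k + 1) _ h4, hb']
          rw [if_pos hwu]
        · rw [hb', if_neg hwu]
      have hlen' : bkts'.length = xs.length + 1 := by
        rw [hb']; split_ifs <;> simp [hlen]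
      rw [hstep, ih (k + 1) j bkts' (by omega) hlen']
      -- relate bkts'.getD j to bkts.getD j
      have hget : ∀ (m : Nat), bkts'.getD m [] =
          if m = k + 1 ∧ w < u then bkts.getD (k + 1) [] ++ [w] else bkts.getD m [] := by
        intro m
        rw [hb']
        by_cases hwu : w < u
        · rw [if_pos hwu]
          by_cases hm : m = k + 1
          · subst hm
            have hlt : k + 1 < bkts.length := by omega
            simp [List.getD_eq_getElem?_getD, hlt, hwu]
          · simp [List.getD_eq_getElem?_getD, Ne.symm hm, hm, hwu]
        · rw [if_neg hwu, if_neg (by tauto)]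
      by_cases hj : j = k + 1
      · subst hj
        rw [if_neg (by omega), hget]
        simp only [Nat.add_sub_cancel, hw]
        by_cases hq : v + xs.getD k 0 < u
        · rw [if_pos ⟨trivial, hq⟩, if_pos ⟨Nat.le_refl _, by omega, hq⟩]
        · rw [if_neg (fun h => hq h.2), if_neg (fun h => hq h.2.2)]
      · rw [hget]
        rw [if_neg (show ¬(j = k + 1 ∧ w < u) from fun h => hj h.1)]
        by_cases hP : k + 1 ≤ j ∧ j ≤ xs.length ∧ v + xs.getD (j - 1) 0 < u
        · rw [if_pos (show k + 1 + 1 ≤ j ∧ j ≤ xs.length ∧ v + xs.getD (j - 1) 0 < u from ⟨by omega, hP.2.1, hP.2.2⟩), if_pos hP]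
        · rw [if_neg (show ¬(k + 1 + 1 ≤ j ∧ j ≤ xs.length ∧ v + xs.getD (j - 1) 0 < u) from fun h => hP ⟨by omega, h.2.1, h.2.2⟩), if_neg hP]

theorem pv_push_getD (xs : List Int) (u v : Int) (k j : Nat) (bkts : List (List Int))
    (hlen : bkts.length = xs.length + 1) :
    (pvPush xs u (k : Int) v bkts).getD j [] =
      if k + 1 ≤ j ∧ j ≤ xs.length ∧ v + xs.getD (j - 1) 0 < u
      then bkts.getD j [] ++ [v + xs.getD (j - 1) 0] else bkts.getD j [] :=
  pv_push_getD_fuel xs u v (xs.length - k) k j bkts (by omega) hlen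

theorem pv_push_length (xs : List Int) (u v : Int) (k : Int) (bkts : List (List Int)) :
    (pvPush xs u k v bkts).length = bkts.length := by
  unfold pvPush
  induction PySem.List.pyRange k (xs.length : Int) 1 generalizing bkts with
  | nil => rfl
  | cons j js ih =>
    simp only [List.foldl_cons]
    rw [ih]
    split_ifs
    · exact pv_pySetD_length _ _ _
    · rfl

-- pushing a whole batch of newly discovered sums appends their candidate list to each future bucket
def pvPushAll (xs : List Int) (u : Int) (k : Nat) (vs : List Int) (bkts : List (List Int)) : List (List Int) :=
  vs.foldl (fun b v => pvPush xs u (k : Int) v b) bkts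

theorem pv_pushAll_length (xs : List Int) (u : Int) (k : Nat) (vs : List Int) (bkts : List (List Int)) :
    (pvPushAll xs u k vs bkts).length = bkts.length := by
  induction vs generalizing bkts with
  | nil => rfl
  | cons v vs ih => rw [pvPushAll, List.foldl_cons, ← pvPushAll, ih, pv_push_length]

theorem pv_pushAll_getD (xs : List Int) (u : Int) (k j : Nat) (vs : List Int) (bkts : List (List Int))
    (hlen : bkts.length = xs.length + 1) :
    (pvPushAll xs u k vs bkts).getD j [] =
      if k + 1 ≤ j ∧ j ≤ xs.length
      then bkts.getD j [] ++ pvCand u (xs.getD (j - 1) 0) vs else bkts.getD j [] := by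
  induction vs generalizing bkts with
  | nil =>
    simp only [pvPushAll, List.foldl_nil, pvCand, List.filter_nil, List.map_nil, List.append_nil]
    split_ifs <;> rfl
  | cons v vs ih =>
    rw [pvPushAll, List.foldl_cons, ← pvPushAll]
    have hlen1 : (pvPush xs u (k : Int) v bkts).length = xs.length + 1 := by
      rw [pv_push_length]; exact hlen
    rw [ih _ hlen1, pv_push_getD xs u v k j bkts hlen, pv_cand_cons]
    by_cases hkj : k + 1 ≤ j ∧ j ≤ xs.length
    · rw [if_pos hkj, if_pos hkj]
      by_cases hv : v + xs.getD (j - 1) 0 < u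
      · rw [if_pos ⟨hkj.1, hkj.2, hv⟩, if_pos hv, List.append_assoc]
      · rw [if_neg (fun h => hv h.2.2), if_neg hv, List.nil_append]
    · rw [if_neg hkj, if_neg hkj, if_neg (fun h => hkj ⟨h.1, h.2.1⟩)]

-- one round: the inner loop folds the popped bucket into seen and pushes from exactly the new sums
theorem pv_inner (xs : List Int) (u : Int) (k : Int) (c : List Int) :
    ∀ (bkts : List (List Int)) (seen : List Int),
    c.foldl (fun (st2 : List (List Int) × List Int) v =>
        if PySem.Set.contains st2.2 v then st2
        else (pvPush xs u k v st2.1, PySem.Set.add st2.2 v)) (bkts, seen)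
      = ((pvNew seen c).foldl (fun b v => pvPush xs u k v b) bkts, PySem.Set.update seen c) := by
  induction c with
  | nil => intro bkts seen; simp [pvNew, PySem.Set.update]
  | cons v c ih =>
    intro bkts seen
    simp only [List.foldl_cons, pvNew, PySem.Set.update]
    by_cases hc : PySem.Set.contains seen v
    · have hadd : PySem.Set.add seen v = seen := by
        simp only [PySem.Set.add, PySem.Set.contains] at hc ⊢; simp at hc; simp [hc]
      rw [if_pos hc, if_pos hc, hadd, ← PySem.Set.update]
      exact ih bkts seen
    · have hadd : PySem.Set.add seen v = seen ++ [v] := by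
        simp only [PySem.Set.add, PySem.Set.contains] at hc ⊢; simp at hc; simp [hc]
      rw [if_neg hc, if_neg hc, hadd, ← PySem.Set.update, List.foldl_cons]
      exact ih (pvPush xs u k v bkts) (seen ++ [v])

-- the whole bucket scan, from any round m onwards, computes the canonical round iteration
theorem pv_outer (xs : List Int) (u : Int) :
    ∀ (fuel m : Nat) (bkts : List (List Int)) (seen : List Int),
    xs.length - m ≤ fuel → m ≤ xs.length → bkts.length = xs.length + 1 → seen.Nodup →
    (∀ j : Nat, m ≤ j → j ≤ xs.length →
        bkts.getD j [] = if j = 0 then [0] else pvCand u (xs.getD (j - 1) 0) seen) →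
    ((PySem.List.pyRange (m : Int) ((xs.length : Int) + 1) 1).foldl
        (fun (st : List (List Int) × List Int) k =>
          (PySem.List.pyGetD st.1 k []).foldl (fun (st2 : List (List Int) × List Int) v =>
            if PySem.Set.contains st2.2 v then st2
            else (pvPush xs u k v st2.1, PySem.Set.add st2.2 v)) st) (bkts, seen)).2
      = pvRounds u (PySem.Set.update seen (bkts.getD m [])) (List.drop m xs) := by
  intro fuel
  induction fuel with
  | zero =>
    intro m bkts seen hf hm hlen hnd hbk
    have hmn : m = xs.length := by omega
    subst hmn
    rw [PySem.List.pyRange_one_cons (by omega), PySem.List.pyRange_one_eq_nil (by omega)]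
    simp only [List.foldl_cons, List.foldl_nil]
    have hc : PySem.List.pyGetD bkts ((xs.length : Nat) : Int) [] = bkts.getD xs.length [] := by
      simp only [PySem.List.pyGetD_natCast]
    rw [hc, pv_inner]
    simp [List.drop_of_length_le, pvRounds]
  | succ fuel ih =>
    intro m bkts seen hf hm hlen hnd hbk
    by_cases hmn : m = xs.length
    · subst hmn
      rw [PySem.List.pyRange_one_cons (by omega), PySem.List.pyRange_one_eq_nil (by omega)]
      simp only [List.foldl_cons, List.foldl_nil]
      have hc : PySem.List.pyGetD bkts ((xs.length : Nat) : Int) [] = bkts.getD xs.length [] := by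
        simp only [PySem.List.pyGetD_natCast]
      rw [hc, pv_inner]
      simp [List.drop_of_length_le, pvRounds]
    · have hm' : m < xs.length := by omega
      rw [PySem.List.pyRange_one_cons (by omega)]
      simp only [List.foldl_cons]
      have hc : PySem.List.pyGetD bkts ((m : Nat) : Int) [] = bkts.getD m [] := by
        simp only [PySem.List.pyGetD_natCast]
      rw [hc, pv_inner]
      set c := bkts.getD m [] with hcdef
      set seen1 := PySem.Set.update seen c with hs1
      have hb1 : (pvNew seen c).foldl (fun b v => pvPush xs u (m : Int) v b) bkts
          = pvPushAll xs u m (pvNew seen c) bkts := rfl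
      rw [hb1]
      set bkts1 := pvPushAll xs u m (pvNew seen c) bkts with hb1d
      have hlen1 : bkts1.length = xs.length + 1 := by rw [hb1d, pv_pushAll_length]; exact hlen
      have hnd1 : seen1.Nodup := pv_nodup_update _ _ hnd
      have hbk1 : ∀ j : Nat, m + 1 ≤ j → j ≤ xs.length →
          bkts1.getD j [] = if j = 0 then [0] else pvCand u (xs.getD (j - 1) 0) seen1 := by
        intro j hj1 hj2
        rw [if_neg (by omega)]
        rw [hb1d, pv_pushAll_getD xs u m j _ bkts hlen, if_pos ⟨hj1, hj2⟩]
        rw [hbk j (by omega) hj2, if_neg (by omega)]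
        rw [hs1, pv_update_eq_append_new, pv_cand_append]
      have hcast : ((m : Int) + 1) = (((m + 1 : Nat)) : Int) := by push_cast; ring
      rw [hcast, ih (m + 1) bkts1 seen1 (by omega) (by omega) hlen1 hnd1 hbk1]
      have hb1m : bkts1.getD (m + 1) [] = pvCand u (xs.getD m 0) seen1 := by
        rw [hbk1 (m + 1) (Nat.le_refl _) (by omega), if_neg (by omega), Nat.add_sub_cancel]
      rw [hb1m]
      have hdrop : List.drop m xs = xs.getD m 0 :: List.drop (m + 1) xs := by
        rw [List.drop_eq_getElem_cons hm', List.getD_eq_getElem _ _ hm']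
      rw [hdrop]
      rfl

-- the initial bucket table, named so the final assembly can state clean facts about it
def pvB0 (xs : List Int) : List (List Int) :=
  (PySem.List.pyRange 0 ((xs.length : Int) + 1) 1).map (fun _ => ([] : List Int))

def pvB1 (xs : List Int) : List (List Int) :=
  PySem.List.pySetD (pvB0 xs) 0 (PySem.List.pyGetD (pvB0 xs) 0 [] ++ [0])

theorem pv_B0_length (xs : List Int) : (pvB0 xs).length = xs.length + 1 := by
  rw [pvB0, List.length_map, PySem.List.length_pyRange_one]
  omega

theorem pv_B0_getD (xs : List Int) (j : Nat) : (pvB0 xs).getD j [] = [] := by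
  rw [pvB0, List.getD_eq_getElem?_getD]
  rcases h : ((PySem.List.pyRange 0 ((xs.length : Int) + 1) 1).map (fun _ => ([] : List Int)))[j]? with _ | t
  · rfl
  · simp only [List.getElem?_map] at h
    rcases h2 : (PySem.List.pyRange 0 ((xs.length : Int) + 1) 1)[j]? with _ | y
    · rw [h2] at h; simp at h
    · rw [h2] at h; simp at h; simp [← h]

theorem pv_B1_eq (xs : List Int) : pvB1 xs = (pvB0 xs).set 0 [0] := by
  rw [pvB1, show ((0 : Int)) = ((0 : Nat) : Int) from rfl,
      pv_pySetD_natCast (pvB0 xs) 0 _ (by rw [pv_B0_length]; omega), PySem.List.pyGetD_natCast]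
  rw [show (pvB0 xs).getD 0 [] = [] from pv_B0_getD xs 0]
  rfl

theorem pv_B1_length (xs : List Int) : (pvB1 xs).length = xs.length + 1 := by
  rw [pv_B1_eq, List.length_set, pv_B0_length]

theorem pv_B1_getD (xs : List Int) (u : Int) (j : Nat) (hj : j ≤ xs.length) :
    (pvB1 xs).getD j [] = if j = 0 then [0] else pvCand u (xs.getD (j - 1) 0) [] := by
  rw [pv_B1_eq, List.getD_eq_getElem?_getD, List.getElem?_set]
  by_cases hj0 : j = 0
  · subst hj0
    simp [pv_B0_length]
  · rw [if_neg (fun h => hj0 h.symm), if_neg hj0]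
    rw [← List.getD_eq_getElem?_getD, pv_B0_getD]
    simp [pvCand]

theorem pv_B_eq (xs : List Int) (u : Int) :
    naive_subset_sums_up_to_u_alt xs u = pvRounds u [0] xs := by
  have hB : naive_subset_sums_up_to_u_alt xs u =
      ((PySem.List.pyRange (((0 : Nat)) : Int) ((xs.length : Int) + 1) 1).foldl
        (fun (st : List (List Int) × List Int) k =>
          (PySem.List.pyGetD st.1 k []).foldl (fun (st2 : List (List Int) × List Int) v =>
            if PySem.Set.contains st2.2 v then st2
            else (pvPush xs u k v st2.1, PySem.Set.add st2.2 v)) st) (pvB1 xs, ([] : List Int))).2 := rfl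
  rw [hB, pv_outer xs u xs.length 0 (pvB1 xs) [] (by omega) (by omega) (pv_B1_length xs) (by simp)
        (fun j _ hj => pv_B1_getD xs u j hj)]
  rw [pv_B1_getD xs u 0 (by omega), if_pos rfl, List.drop_zero]
  have hupd : PySem.Set.update ([] : List Int) [0] = [0] := by decide
  rw [hupd]

-- ===== VERDICT (by name: the statement is the Claim_ definition above) =====
theorem naive_subset_sums_up_to_u_spec : Claim_equal_naive_subset_sums_up_to_u := by
  intro xs u _
  unfold Spec_naive_subset_sums_up_to_u
  rw [pv_A_eq, pv_B_eq]
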